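-- pv_equiv track=rewrite | github.com/ydj1215/Python_Study | 코드업 기초 100제/6097번.py | func
-- ===== SOURCE A (Python) =====
-- def func(a, b, c, d, ls):
-- 	if b == 0:  # 가로
-- 		for i in range(d-1,d-1+a,1):
-- 			if ls[c - 1][i] == 0:
-- 				ls[c - 1][i] = 1
-- 			else:
-- 				continue
-- 	elif b == 1:  # 세로
-- 		for i in range(c-1,c-1+a,1):
-- 			if ls[i][d-1] == 0:
-- 				ls[i][d - 1] = 1
-- 			else:
-- 				continue
-- 	return ls
-- ===== SOURCE B (Python) =====
-- def func(a, b, c, d, ls):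
--     if b == 0:
--         cells = {(c - 1, j) for j in range(d - 1, d - 1 + a)}
--     elif b == 1:
--         cells = {(i, d - 1) for i in range(c - 1, c - 1 + a)}
--     else:
--         cells = set()
--     return [[1 if x == 0 and (r, j) in cells else x
--              for j, x in enumerate(row)]
--             for r, row in enumerate(ls)]
-- ===== Notes on version B (the rewrite author's own statement) =====
-- stated objective: alternative
-- what changed: B first builds the set of target (row, col) coordinates and then rebuilds the grid in one pure pass with a membership test per cell, instead of A's two branch-embedded index loops mutating the targeted cells in place; Pre_ restricts to the natural 1-indexed domain where the requested segment lies wholly inside the grid, excluding inputs where A raises IndexError or writes through Python's negative-index wraparound.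
-- outside the precondition, e.g. on func(1, 0, 0, 1, [[0], [0]]): A returns [[0], [1]], B returns [[0], [0]]
import Mathlib
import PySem

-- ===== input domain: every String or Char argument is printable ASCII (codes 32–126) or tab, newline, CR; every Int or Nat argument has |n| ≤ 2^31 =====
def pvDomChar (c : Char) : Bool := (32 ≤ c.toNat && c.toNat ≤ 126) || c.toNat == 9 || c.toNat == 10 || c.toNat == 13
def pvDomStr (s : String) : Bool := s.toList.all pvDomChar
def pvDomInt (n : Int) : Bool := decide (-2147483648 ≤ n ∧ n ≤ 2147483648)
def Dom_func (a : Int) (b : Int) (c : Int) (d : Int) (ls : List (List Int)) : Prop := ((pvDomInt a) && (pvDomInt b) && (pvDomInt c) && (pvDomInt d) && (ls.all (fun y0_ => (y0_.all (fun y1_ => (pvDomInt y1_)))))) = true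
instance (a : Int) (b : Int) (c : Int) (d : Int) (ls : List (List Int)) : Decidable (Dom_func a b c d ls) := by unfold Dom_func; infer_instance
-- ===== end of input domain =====

-- B builds the set of target coordinates first and rebuilds the grid in one pure pass with a
-- membership test (objective: alternative). Python A mutates ls in place, B returns a fresh grid;
-- the equivalence proved here is about the RETURN value only.

-- ===== PORT A =====
-- the statement 'if ls[r][j] == 0: ls[r][j] = 1' (shared verbatim by A's two branches)
def pvUpd (g : List (List Int)) (r j : Int) : List (List Int) :=
  if PySem.List.pyGetD (PySem.List.pyGetD g r []) j 0 = 0 then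
    PySem.List.pySetD g r (PySem.List.pySetD (PySem.List.pyGetD g r []) j 1)
  else g

def func (a : Int) (b : Int) (c : Int) (d : Int) (ls : List (List Int)) : List (List Int) :=
  if b = 0 then
    (PySem.List.pyRange (d-1) (d-1+a) 1).foldl (fun g i => pvUpd g (c-1) i) ls
  else if b = 1 then
    (PySem.List.pyRange (c-1) (c-1+a) 1).foldl (fun g i => pvUpd g i (d-1)) ls
  else ls

-- ===== PORT B =====
-- the 'cells' set of Source B
def pvCells (a : Int) (b : Int) (c : Int) (d : Int) : PySem.Set (Int × Int) :=
  if b = 0 then PySem.Set.ofList ((PySem.List.pyRange (d-1) (d-1+a) 1).map (fun j => (c-1, j)))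
  else if b = 1 then PySem.Set.ofList ((PySem.List.pyRange (c-1) (c-1+a) 1).map (fun i => (i, d-1)))
  else PySem.Set.empty

def func_alt (a : Int) (b : Int) (c : Int) (d : Int) (ls : List (List Int)) : List (List Int) :=
  let cells := pvCells a b c d
  (PySem.List.enumerate ls).map (fun p =>
    (PySem.List.enumerate p.2).map (fun q =>
      if q.2 = 0 ∧ PySem.Set.contains cells (p.1, q.1) then 1 else q.2))

-- ===== PRECONDITION & SPEC =====
-- Pre_ restricts to the natural 1-indexed domain of the exercise: when a segment is actually drawn
-- (b ∈ {0,1} and a > 0) it must lie wholly inside the grid with 1-based coordinates. Outside this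
-- domain Python A either raises an IndexError or silently writes other cells through Python's
-- negative-index wraparound, an artefact of its in-place indexing.
def Pre_func (a : Int) (b : Int) (c : Int) (d : Int) (ls : List (List Int)) : Prop :=
  (b = 0 → 0 < a → 1 ≤ c ∧ c ≤ ls.length ∧ 1 ≤ d ∧
      d - 1 + a ≤ ((ls.getD (c-1).toNat []).length : Int)) ∧
  (b = 1 → 0 < a → 1 ≤ c ∧ c - 1 + a ≤ ls.length ∧ 1 ≤ d ∧
      ∀ i ∈ PySem.List.pyRange (c-1) (c-1+a) 1, d ≤ ((ls.getD i.toNat []).length : Int))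

instance (a : Int) (b : Int) (c : Int) (d : Int) (ls : List (List Int)) : Decidable (Pre_func a b c d ls) := by unfold Pre_func; infer_instance

def pvWitness_func : Int × Int × Int × Int × List (List Int) := (2, 0, 1, 1, [[0, 3, 0], [0, 0, 0]])

def Spec_func (a : Int) (b : Int) (c : Int) (d : Int) (ls : List (List Int)) (out : List (List Int)) : Prop := out = func_alt a b c d ls
instance (a : Int) (b : Int) (c : Int) (d : Int) (ls : List (List Int)) (out : List (List Int)) : Decidable (Spec_func a b c d ls out) := by unfold Spec_func; infer_instance

-- ===== CLAIM (what is proved, stated in full; the proofs are below) =====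
def Claim_equal_func : Prop := ∀ (a : Int) (b : Int) (c : Int) (d : Int) (ls : List (List Int)), Dom_func a b c d ls → Pre_func a b c d ls → Spec_func a b c d ls (func a b c d ls)

-- ===== LEMMAS AND PROOFS =====

-- Python's normalisation of a (possibly negative) in-range index to a Nat position
def pvNorm (i : Int) (n : Nat) : Nat := if 0 ≤ i then i.toNat else n - (-i).toNat

-- total row / cell accessors used to state all invariants without dependent indexing
def pvRow (X : List (List Int)) (rn : Nat) : List Int := X.getD rn []
def pvCell (X : List (List Int)) (rn jn : Nat) : Int := (pvRow X rn).getD jn 0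

theorem pvNorm_lt {n : Nat} {i : Int} (h : PySem.Raise.InRange n i) : pvNorm i n < n := by
  obtain ⟨h1, h2⟩ := h; unfold pvNorm; split <;> omega

theorem pvIdx_norm {n : Nat} {i : Int} (h : PySem.Raise.InRange n i) :
    PySem.List.pyIdx? n i = some (pvNorm i n) := by
  obtain ⟨h1, h2⟩ := h
  unfold PySem.List.pyIdx? pvNorm
  split_ifs <;> first | rfl | omega

theorem pvIdx_none {n : Nat} {i : Int} (h : ¬ PySem.Raise.InRange n i) :
    PySem.List.pyIdx? n i = none := by
  have h' : ¬ (-(n : Int) ≤ i ∧ i < n) := h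
  unfold PySem.List.pyIdx?
  split_ifs <;> first | rfl | omega

theorem pvNorm_eq_iff {n : Nat} {i : Int} {k : Nat} (h : PySem.Raise.InRange n i) (hk : k < n) :
    (pvNorm i n = k) ↔ (i = (k : Int) ∨ i = (k : Int) - (n : Int)) := by
  obtain ⟨h1, h2⟩ := h; unfold pvNorm; split <;> omega

theorem pvGetD_norm {α : Type} (xs : List α) {i : Int} (d : α) (h : PySem.Raise.InRange xs.length i) :
    PySem.List.pyGetD xs i d = xs.getD (pvNorm i xs.length) d := by
  unfold PySem.List.pyGetD PySem.List.pyGet?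
  rw [pvIdx_norm h, List.getD_eq_getElem?_getD]
  rfl

theorem pvSetD_norm {α : Type} (xs : List α) {i : Int} (v : α) (h : PySem.Raise.InRange xs.length i) :
    PySem.List.pySetD xs i v = xs.set (pvNorm i xs.length) v := by
  unfold PySem.List.pySetD PySem.List.pySet?
  rw [pvIdx_norm h]
  rfl

theorem pvSetD_oor {α : Type} (xs : List α) {i : Int} (v : α) (h : ¬ PySem.Raise.InRange xs.length i) :
    PySem.List.pySetD xs i v = xs := by
  unfold PySem.List.pySetD PySem.List.pySet?
  rw [pvIdx_none h]
  rfl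

theorem pvGetD_row (g : List (List Int)) {r : Int} (h : PySem.Raise.InRange g.length r) :
    PySem.List.pyGetD g r [] = pvRow g (pvNorm r g.length) := pvGetD_norm g [] h

theorem pvGetD_set {α : Type} (l : List α) (i j : Nat) (v : α) (d : α) :
    (l.set i v).getD j d = if i = j ∧ i < l.length then v else l.getD j d := by
  rw [List.getD_eq_getElem?_getD, List.getElem?_set, List.getD_eq_getElem?_getD]
  by_cases h1 : i = j
  · subst h1
    by_cases h2 : i < l.length
    · simp [h2]
    · simp [h2]
  · simp [h1]

theorem pvUpd_length (g : List (List Int)) (r j : Int) : (pvUpd g r j).length = g.length := by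
  unfold pvUpd
  split
  · exact PySem.List.length_pySetD _ _ _
  · rfl

theorem pvUpd_rowlen (g : List (List Int)) (r j : Int) (rn : Nat) :
    (pvRow (pvUpd g r j) rn).length = (pvRow g rn).length := by
  unfold pvUpd
  split
  · by_cases hr : PySem.Raise.InRange g.length r
    · rw [pvSetD_norm _ _ hr]
      unfold pvRow
      rw [pvGetD_set]
      split
      · next h =>
        rw [PySem.List.length_pySetD, pvGetD_row g hr]
        unfold pvRow
        rw [h.1]
      · rfl
    · rw [pvSetD_oor _ _ hr]
  · rfl

theorem pvRow_set (X : List (List Int)) (K : Nat) (v : List Int) (rn : Nat) :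
    pvRow (X.set K v) rn = if K = rn ∧ K < X.length then v else pvRow X rn := by
  unfold pvRow
  exact pvGetD_set X K rn v []

theorem pvUpd_cell (g : List (List Int)) (r j : Int)
    (hr : PySem.Raise.InRange g.length r)
    (hj : PySem.Raise.InRange (PySem.List.pyGetD g r []).length j)
    (rn jn : Nat) (hrn : rn < g.length) (hjn : jn < (pvRow g rn).length) :
    pvCell (pvUpd g r j) rn jn =
      if pvCell g rn jn = 0 ∧ (r = (rn : Int) ∨ r = (rn : Int) - (g.length : Int)) ∧
          (j = (jn : Int) ∨ j = (jn : Int) - ((pvRow g rn).length : Int)) then 1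
      else pvCell g rn jn := by
  have hT : PySem.List.pyGetD g r [] = pvRow g (pvNorm r g.length) := pvGetD_row g hr
  rw [hT] at hj
  have hRlt : pvNorm r g.length < g.length := pvNorm_lt hr
  have hJlt : pvNorm j (pvRow g (pvNorm r g.length)).length < (pvRow g (pvNorm r g.length)).length :=
    pvNorm_lt hj
  unfold pvUpd
  rw [hT, pvGetD_norm _ 0 hj]
  split
  · next h0 =>
    rw [pvSetD_norm _ _ hj, pvSetD_norm _ _ hr]
    unfold pvCell
    rw [pvRow_set]
    by_cases hR : pvNorm r g.length = rn
    · subst hR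
      rw [if_pos ⟨rfl, hRlt⟩, pvGetD_set]
      have hrowmatch := (pvNorm_eq_iff hr hrn).mp rfl
      by_cases hJ : pvNorm j (pvRow g (pvNorm r g.length)).length = jn
      · rw [if_pos ⟨hJ, hJlt⟩]
        have hcell0 : (pvRow g (pvNorm r g.length)).getD jn 0 = 0 := by rw [← hJ]; exact h0
        have hcolmatch := (pvNorm_eq_iff hj hjn).mp hJ
        rw [if_pos ⟨hcell0, hrowmatch, hcolmatch⟩]
      · rw [if_neg (fun hc => hJ hc.1)]
        rw [if_neg (fun hc => hJ ((pvNorm_eq_iff hj hjn).mpr hc.2.2))]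
    · rw [if_neg (fun hc => hR hc.1)]
      rw [if_neg (fun hc => hR ((pvNorm_eq_iff hr hrn).mpr hc.2.1))]
  · next h0 =>
    rw [if_neg ?_]
    intro hcon
    obtain ⟨hc0, hrow, hcol⟩ := hcon
    have hR : pvNorm r g.length = rn := (pvNorm_eq_iff hr hrn).mpr hrow
    rw [hR] at hj h0
    have hJ : pvNorm j (pvRow g rn).length = jn := (pvNorm_eq_iff hj hjn).mpr hcol
    rw [hJ] at h0
    exact h0 hc0

def pvFold (CL : List (Int × Int)) (g : List (List Int)) : List (List Int) :=
  CL.foldl (fun g p => pvUpd g p.1 p.2) g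

theorem pvFold_length (CL : List (Int × Int)) (g : List (List Int)) :
    (pvFold CL g).length = g.length := by
  induction CL generalizing g with
  | nil => rfl
  | cons p CL ih => rw [pvFold, List.foldl_cons, ← pvFold, ih, pvUpd_length]

theorem pvFold_rowlen (CL : List (Int × Int)) (g : List (List Int)) (rn : Nat) :
    (pvRow (pvFold CL g) rn).length = (pvRow g rn).length := by
  induction CL generalizing g with
  | nil => rfl
  | cons p CL ih => rw [pvFold, List.foldl_cons, ← pvFold, ih, pvUpd_rowlen]

theorem pvFold_cell (CL : List (Int × Int)) (g : List (List Int))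
    (H : ∀ p ∈ CL, PySem.Raise.InRange g.length p.1 ∧
      PySem.Raise.InRange (PySem.List.pyGetD g p.1 []).length p.2)
    (rn jn : Nat) (hrn : rn < g.length) (hjn : jn < (pvRow g rn).length) :
    pvCell (pvFold CL g) rn jn =
      if pvCell g rn jn = 0 ∧ (∃ p ∈ CL, (p.1 = (rn : Int) ∨ p.1 = (rn : Int) - (g.length : Int)) ∧
          (p.2 = (jn : Int) ∨ p.2 = (jn : Int) - ((pvRow g rn).length : Int))) then 1
      else pvCell g rn jn := by
  induction CL generalizing g with
  | nil => simp [pvFold]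
  | cons p CL ih =>
    obtain ⟨hr, hj⟩ := H p (List.mem_cons_self)
    rw [pvFold, List.foldl_cons, ← pvFold]
    have hH' : ∀ q ∈ CL, PySem.Raise.InRange (pvUpd g p.1 p.2).length q.1 ∧
        PySem.Raise.InRange (PySem.List.pyGetD (pvUpd g p.1 p.2) q.1 []).length q.2 := by
      intro q hq
      obtain ⟨hq1, hq2⟩ := H q (List.mem_cons_of_mem _ hq)
      constructor
      · rw [pvUpd_length]; exact hq1
      · have hq1' : PySem.Raise.InRange (pvUpd g p.1 p.2).length q.1 := by
          rw [pvUpd_length]; exact hq1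
        rw [pvGetD_row _ hq1', pvUpd_length, pvUpd_rowlen]
        rw [pvGetD_row _ hq1] at hq2
        exact hq2
    rw [ih (pvUpd g p.1 p.2) hH' (by rw [pvUpd_length]; exact hrn)
        (by rw [pvUpd_rowlen]; exact hjn)]
    rw [pvUpd_length, pvUpd_rowlen]
    rw [pvUpd_cell g p.1 p.2 hr hj rn jn hrn hjn]
    simp only [List.exists_mem_cons_iff]
    by_cases c0 : pvCell g rn jn = 0 <;>
      by_cases hm : (p.1 = (rn : Int) ∨ p.1 = (rn : Int) - (g.length : Int)) ∧
          (p.2 = (jn : Int) ∨ p.2 = (jn : Int) - ((pvRow g rn).length : Int)) <;>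
      by_cases ex : ∃ q ∈ CL, (q.1 = (rn : Int) ∨ q.1 = (rn : Int) - (g.length : Int)) ∧
          (q.2 = (jn : Int) ∨ q.2 = (jn : Int) - ((pvRow g rn).length : Int)) <;>
      simp [c0, hm, ex]

theorem pvAlt_length (a b c d : Int) (ls : List (List Int)) :
    (func_alt a b c d ls).length = ls.length := by
  unfold func_alt
  rw [List.length_map, PySem.List.length_enumerate]

theorem pvAlt_row (a b c d : Int) (ls : List (List Int)) (rn : Nat) (hrn : rn < ls.length) :
    pvRow (func_alt a b c d ls) rn =
      (PySem.List.enumerate (ls[rn]'hrn)).map (fun q =>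
        if q.2 = 0 ∧ PySem.Set.contains (pvCells a b c d) ((rn : Int), q.1) then 1 else q.2) := by
  unfold func_alt pvRow
  rw [List.getD_eq_getElem _ _ (by rw [List.length_map, PySem.List.length_enumerate]; exact hrn)]
  rw [List.getElem_map, PySem.List.getElem_enumerate]
  simp

theorem pvAlt_rowlen (a b c d : Int) (ls : List (List Int)) (rn : Nat) (hrn : rn < ls.length) :
    (pvRow (func_alt a b c d ls) rn).length = (pvRow ls rn).length := by
  rw [pvAlt_row a b c d ls rn hrn, List.length_map, PySem.List.length_enumerate,
    pvRow, List.getD_eq_getElem _ _ hrn]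

theorem pvAlt_cell (a b c d : Int) (ls : List (List Int)) (rn jn : Nat)
    (hrn : rn < ls.length) (hjn : jn < (pvRow ls rn).length) :
    pvCell (func_alt a b c d ls) rn jn =
      if pvCell ls rn jn = 0 ∧ PySem.Set.contains (pvCells a b c d) ((rn : Int), (jn : Int)) = true
      then 1 else pvCell ls rn jn := by
  have hrow : pvRow ls rn = ls[rn]'hrn := by rw [pvRow, List.getD_eq_getElem _ _ hrn]
  rw [hrow] at hjn
  unfold pvCell
  rw [pvAlt_row a b c d ls rn hrn, hrow]
  rw [List.getD_eq_getElem _ _ (by rw [List.length_map, PySem.List.length_enumerate]; exact hjn)]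
  rw [List.getElem_map, PySem.List.getElem_enumerate]
  rw [List.getD_eq_getElem _ _ hjn]
  simp

theorem pvExt (X Y : List (List Int)) (h1 : X.length = Y.length)
    (h2 : ∀ rn, rn < X.length → (pvRow X rn).length = (pvRow Y rn).length)
    (h3 : ∀ rn jn, rn < X.length → jn < (pvRow X rn).length → pvCell X rn jn = pvCell Y rn jn) :
    X = Y := by
  apply List.ext_getElem h1
  intro rn hr1 hr2
  apply List.ext_getElem
  · have := h2 rn hr1
    rwa [pvRow, pvRow, List.getD_eq_getElem _ _ hr1, List.getD_eq_getElem _ _ hr2] at this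
  · intro jn hj1 hj2
    have := h3 rn jn hr1 (by rw [pvRow, List.getD_eq_getElem _ _ hr1]; exact hj1)
    unfold pvCell pvRow at this
    rwa [List.getD_eq_getElem _ _ hr1, List.getD_eq_getElem _ _ hr2,
      List.getD_eq_getElem _ _ hj1, List.getD_eq_getElem _ _ hj2] at this

theorem pvFuncA_fold (a b c d : Int) (ls : List (List Int)) :
    func a b c d ls =
      if b = 0 then pvFold ((PySem.List.pyRange (d-1) (d-1+a) 1).map (fun i => ((c-1 : Int), i))) ls
      else if b = 1 then pvFold ((PySem.List.pyRange (c-1) (c-1+a) 1).map (fun i => (i, (d-1 : Int)))) ls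
      else ls := by
  unfold func pvFold
  rw [List.foldl_map, List.foldl_map]

-- the wrap disjuncts in the fold characterisation collapse when all coordinates are non-negative
theorem pvCond_b0 (a c d : Int) (n m rn jn : Nat) (hc : 1 ≤ c) (hd : 1 ≤ d)
    (hrn : rn < n) (hjn : jn < m) :
    ((∃ p ∈ (PySem.List.pyRange (d-1) (d-1+a) 1).map (fun i => ((c-1 : Int), i)),
        (p.1 = (rn : Int) ∨ p.1 = (rn : Int) - (n : Int)) ∧
        (p.2 = (jn : Int) ∨ p.2 = (jn : Int) - (m : Int))) ↔
      ((rn : Int), (jn : Int)) ∈ (PySem.List.pyRange (d-1) (d-1+a) 1).map (fun i => ((c-1 : Int), i))) := by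
  simp only [List.mem_map, PySem.List.mem_pyRange_one, Prod.mk.injEq]
  constructor
  · rintro ⟨p, ⟨i, hi, rfl⟩, hrow, hcol⟩
    exact ⟨(jn : Int), by omega, by omega, rfl⟩
  · rintro ⟨i, hi, h1, h2⟩
    exact ⟨((c-1 : Int), i), ⟨i, hi, rfl⟩, Or.inl h1, Or.inl h2⟩

theorem pvCond_b1 (a c d : Int) (n m rn jn : Nat) (hc : 1 ≤ c) (hd : 1 ≤ d)
    (hrn : rn < n) (hjn : jn < m) :
    ((∃ p ∈ (PySem.List.pyRange (c-1) (c-1+a) 1).map (fun i => (i, (d-1 : Int))),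
        (p.1 = (rn : Int) ∨ p.1 = (rn : Int) - (n : Int)) ∧
        (p.2 = (jn : Int) ∨ p.2 = (jn : Int) - (m : Int))) ↔
      ((rn : Int), (jn : Int)) ∈ (PySem.List.pyRange (c-1) (c-1+a) 1).map (fun i => (i, (d-1 : Int)))) := by
  simp only [List.mem_map, PySem.List.mem_pyRange_one, Prod.mk.injEq]
  constructor
  · rintro ⟨p, ⟨i, hi, rfl⟩, hrow, hcol⟩
    exact ⟨(rn : Int), by omega, rfl, by omega⟩
  · rintro ⟨i, hi, h1, h2⟩
    exact ⟨(i, (d-1 : Int)), ⟨i, hi, rfl⟩, Or.inl h1, Or.inl h2⟩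

theorem pvContains_ofList (L : List (Int × Int)) (x : Int × Int) :
    PySem.Set.contains (PySem.Set.ofList L) x = true ↔ x ∈ L := by
  rw [PySem.Set.contains_iff, PySem.Set.mem_ofList]

-- ===== VERDICT (by name: the statement is the Claim_ definition above) =====
theorem func_spec : Claim_equal_func := by
  intro a b c d ls _ hPre
  unfold Spec_func
  by_cases hb0 : b = 0
  · subst hb0
    set CL := (PySem.List.pyRange (d-1) (d-1+a) 1).map (fun i => ((c-1 : Int), i)) with hCL
    have hH : ∀ p ∈ CL, PySem.Raise.InRange ls.length p.1 ∧
        PySem.Raise.InRange (PySem.List.pyGetD ls p.1 []).length p.2 := by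
      intro p hp
      rw [hCL, List.mem_map] at hp
      obtain ⟨i, hi, rfl⟩ := hp
      rw [PySem.List.mem_pyRange_one] at hi
      have ha : 0 < a := by omega
      obtain ⟨hc1, hc2, hd1, hlen⟩ := hPre.1 rfl ha
      have hrIn : PySem.Raise.InRange ls.length (c-1) := ⟨by omega, by omega⟩
      refine ⟨hrIn, ?_⟩
      rw [pvGetD_norm _ [] hrIn]
      have hnorm : pvNorm (c-1) ls.length = (c-1).toNat := by unfold pvNorm; split <;> omega
      rw [hnorm]
      exact ⟨by omega, by omega⟩
    rw [pvFuncA_fold, if_pos rfl, ← hCL]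
    apply pvExt
    · rw [pvFold_length, pvAlt_length]
    · intro rn hrn
      rw [pvFold_length] at hrn
      rw [pvFold_rowlen, pvAlt_rowlen _ _ _ _ _ _ hrn]
    · intro rn jn hrn hjn
      rw [pvFold_length] at hrn
      rw [pvFold_rowlen] at hjn
      rw [pvFold_cell CL ls hH rn jn hrn hjn, pvAlt_cell _ _ _ _ _ _ _ hrn hjn]
      by_cases ha : 0 < a
      · obtain ⟨hc1, _, hd1, _⟩ := hPre.1 rfl ha
        rw [pvCells, if_pos rfl]
        simp only [hCL, pvCond_b0 a c d ls.length (pvRow ls rn).length rn jn hc1 hd1 hrn hjn,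
          pvContains_ofList]
      · have hnil : PySem.List.pyRange (d-1) (d-1+a) 1 = [] :=
          PySem.List.pyRange_one_eq_nil (by omega)
        rw [pvCells, if_pos rfl]
        simp [hCL, hnil]
  · by_cases hb1 : b = 1
    · subst hb1
      set CL := (PySem.List.pyRange (c-1) (c-1+a) 1).map (fun i => (i, (d-1 : Int))) with hCL
      have hH : ∀ p ∈ CL, PySem.Raise.InRange ls.length p.1 ∧
          PySem.Raise.InRange (PySem.List.pyGetD ls p.1 []).length p.2 := by
        intro p hp
        rw [hCL, List.mem_map] at hp
        obtain ⟨i, hi, rfl⟩ := hp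
        have hi' := hi
        rw [PySem.List.mem_pyRange_one] at hi'
        have ha : 0 < a := by omega
        obtain ⟨hc1, hc2, hd1, hall⟩ := hPre.2 rfl ha
        have hrIn : PySem.Raise.InRange ls.length i := ⟨by omega, by omega⟩
        refine ⟨hrIn, ?_⟩
        rw [pvGetD_norm _ [] hrIn]
        have hnorm : pvNorm i ls.length = i.toNat := by unfold pvNorm; split <;> omega
        rw [hnorm]
        have := hall i hi
        exact ⟨by omega, by omega⟩
      rw [pvFuncA_fold, if_neg one_ne_zero, if_pos rfl, ← hCL]
      apply pvExt
      · rw [pvFold_length, pvAlt_length]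
      · intro rn hrn
        rw [pvFold_length] at hrn
        rw [pvFold_rowlen, pvAlt_rowlen _ _ _ _ _ _ hrn]
      · intro rn jn hrn hjn
        rw [pvFold_length] at hrn
        rw [pvFold_rowlen] at hjn
        rw [pvFold_cell CL ls hH rn jn hrn hjn, pvAlt_cell _ _ _ _ _ _ _ hrn hjn]
        by_cases ha : 0 < a
        · obtain ⟨hc1, _, hd1, _⟩ := hPre.2 rfl ha
          rw [pvCells, if_neg one_ne_zero, if_pos rfl]
          simp only [hCL, pvCond_b1 a c d ls.length (pvRow ls rn).length rn jn hc1 hd1 hrn hjn,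
            pvContains_ofList]
        · have hnil : PySem.List.pyRange (c-1) (c-1+a) 1 = [] :=
            PySem.List.pyRange_one_eq_nil (by omega)
          rw [pvCells, if_neg one_ne_zero, if_pos rfl]
          simp [hCL, hnil]
    · rw [pvFuncA_fold, if_neg hb0, if_neg hb1]
      apply pvExt
      · rw [pvAlt_length]
      · intro rn hrn
        rw [pvAlt_rowlen _ _ _ _ _ _ hrn]
      · intro rn jn hrn hjn
        rw [pvAlt_cell _ _ _ _ _ _ _ hrn hjn, pvCells, if_neg hb0, if_neg hb1]
        simp [PySem.Set.empty, PySem.Set.contains]
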